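-- pv_equiv track=rewrite | github.com/hcast04/CAIM | session2ESprogramming/pruebas.py | fill_lists
-- ===== SOURCE A (Python) =====
-- def fill_lists(l1_tv, l2_tv, l1_df, l2_df):
--     l1aux_tv = l1_tv
--     l2aux_tv = l2_tv
--
--     for i in range(len(l1aux_tv)):
--         found = False
--         for j in range(len(l2aux_tv)):
--             if l1aux_tv[i][0] == l2aux_tv[j][0]:
--                 found = True
--
--         if not found:
--             l2_tv.append((l1_tv[i][0], 0))
--
--     for i in range(len(l2aux_tv)):
--         found = False
--         for j in range(len(l1aux_tv)):
--             if l2aux_tv[i][0] == l1aux_tv[j][0]: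
--                 found = True
--
--         if not found:
--             l1_tv.append((l2_tv[i][0], 0))
--
--     l1_tv.sort()
--     l2_tv.sort()
--
--     l1aux_df = l1_df
--     l2aux_df = l2_df
--
--     for i in range(len(l1aux_df)):
--         found = False
--         for j in range(len(l2aux_df)):
--             if l1aux_df[i][0] == l2aux_df[j][0]:
--                 found = True
--
--         if not found:
--             l2_df.append((l1_df[i][0], l1_df[i][1]))
--
--     # seguramente el siguiente for sea equivalente a l2_df = l1_df
--
--     for i in range(len(l2aux_df)):
--         found = False
--         for j in range(len(l1aux_df)):
--             if l2aux_df[i][0] == l1aux_df[j][0]: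
--                 found = True
--
--         if not found:
--             l1_df.append((l2_df[i][0], l2_df[i][1]))
--
--     l1_df.sort()
--     l2_df.sort()
--
--     return l1_tv, l2_tv, l1_df, l2_df
-- ===== SOURCE B (Python) =====
-- def fill_lists(l1_tv, l2_tv, l1_df, l2_df):
--     def first(lst):
--         m = {}
--         for k, v in lst:
--             m.setdefault(k, v)
--         return m
--
--     def combine(dst, dst_map, src_map, zero):
--         extra = sorted((k, 0 if zero else v) for k, v in src_map.items() if k not in dst_map)
--         a = sorted(dst)
--         out = []
--         i = j = 0
--         while i < len(a) and j < len(extra):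
--             if a[i] <= extra[j]:
--                 out.append(a[i]); i += 1
--             else:
--                 out.append(extra[j]); j += 1
--         return out + a[i:] + extra[j:]
--
--     m1_tv, m2_tv = first(l1_tv), first(l2_tv)
--     m1_df, m2_df = first(l1_df), first(l2_df)
--     return (combine(l1_tv, m1_tv, m2_tv, True),
--             combine(l2_tv, m2_tv, m1_tv, True),
--             combine(l1_df, m1_df, m2_df, False),
--             combine(l2_df, m2_df, m1_df, False))
-- ===== Notes on version B (the rewrite author's own statement) =====
-- stated objective: faster
-- what changed: Instead of A's fill-then-resort (nested O(n*m) membership scans appending missing keys into the lists it is scanning, then a full sort of each filled list), B builds a first-occurrence dict per list once, sorts only the missing entries, and produces each result by a linear two-pointer merge of the two sorted runs; B is also pure while A mutates l1_tv/l2_tv/l1_df/l2_df in place (return values agree).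
import Mathlib
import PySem

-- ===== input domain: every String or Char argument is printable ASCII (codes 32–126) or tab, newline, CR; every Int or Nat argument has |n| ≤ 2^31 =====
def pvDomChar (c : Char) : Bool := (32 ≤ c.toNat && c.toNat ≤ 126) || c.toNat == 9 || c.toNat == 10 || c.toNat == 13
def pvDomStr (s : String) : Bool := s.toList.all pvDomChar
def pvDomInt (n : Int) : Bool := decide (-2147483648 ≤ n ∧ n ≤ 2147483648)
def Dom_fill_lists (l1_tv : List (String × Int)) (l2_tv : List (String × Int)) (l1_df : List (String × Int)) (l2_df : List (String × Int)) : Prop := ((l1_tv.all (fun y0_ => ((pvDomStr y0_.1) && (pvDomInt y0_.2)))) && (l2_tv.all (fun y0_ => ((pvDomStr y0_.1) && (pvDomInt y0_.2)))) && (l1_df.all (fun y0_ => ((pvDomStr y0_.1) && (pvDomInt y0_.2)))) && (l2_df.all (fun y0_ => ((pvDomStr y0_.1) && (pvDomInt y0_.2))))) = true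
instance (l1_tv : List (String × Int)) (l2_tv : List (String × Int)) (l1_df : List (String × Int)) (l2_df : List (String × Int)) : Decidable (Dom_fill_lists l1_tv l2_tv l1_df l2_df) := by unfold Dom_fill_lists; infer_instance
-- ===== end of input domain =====

-- B replaces A's quadratic fill-then-resort (nested membership scans, append, full sort of the filled lists) by:
-- one first-occurrence dict per list, the sorted missing entries, and a linear two-pointer MERGE of the two sorted runs.
-- A mutates its list arguments in place, B is pure: equivalence is about the RETURN value only.
-- ===== PORT A =====
-- inner 'for j ...: if ...: found = True' loop of A
def pyFound (k : String) (l : List (String × Int)) : Bool :=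
  l.foldl (fun found p => if p.1 == k then true else found) false

-- A's outer loop shape: for each p in src, if its key is not found in acc, append g p
-- (g is (fun p => (p.1, 0)) for the _tv loops and id for the _df loops)
def fillLoop (g : (String × Int) → (String × Int)) : List (String × Int) → List (String × Int) → List (String × Int)
  | [], acc => acc
  | p :: rest, acc => fillLoop g rest (if pyFound p.1 acc then acc else acc ++ [g p])

def fill_lists (l1_tv : List (String × Int)) (l2_tv : List (String × Int)) (l1_df : List (String × Int)) (l2_df : List (String × Int)) : (List (String × Int)) × (List (String × Int)) × (List (String × Int)) × (List (String × Int)) :=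
  let l2tv' := fillLoop (fun p => (p.1, 0)) l1_tv l2_tv
  let l1tv' := fillLoop (fun p => (p.1, 0)) l2tv' l1_tv
  let r1tv := PySem.List.sorted2 l1tv' Prod.fst Prod.snd
  let r2tv := PySem.List.sorted2 l2tv' Prod.fst Prod.snd
  let l2df' := fillLoop (fun p => p) l1_df l2_df
  let l1df' := fillLoop (fun p => p) l2df' l1_df
  let r1df := PySem.List.sorted2 l1df' Prod.fst Prod.snd
  let r2df := PySem.List.sorted2 l2df' Prod.fst Prod.snd
  (r1tv, r2tv, r1df, r2df)

-- ===== PORT B =====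
-- B's 'first(lst)': dict of first occurrence per key, via setdefault
def firstMap (lst : List (String × Int)) : PySem.Dict String Int :=
  lst.foldl (fun m kv => PySem.Dict.setdefault m kv.1 kv.2) PySem.Dict.empty

-- Python's 'a[i] <= extra[j]' on (str, int) tuples: lexicographic ≤
def pairLe (p q : String × Int) : Bool :=
  decide (p.1 < q.1) || (p.1 == q.1 && decide (p.2 ≤ q.2))

-- B's two-pointer while loop over the two sorted runs, as recursion on the suffixes
def mergeLoop : List (String × Int) → List (String × Int) → List (String × Int)
  | [], ys => ys
  | x :: xs, [] => x :: xs
  | x :: xs, y :: ys =>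
    if pairLe x y then x :: mergeLoop xs (y :: ys) else y :: mergeLoop (x :: xs) ys
termination_by a b => a.length + b.length

-- B's 'combine(dst, dst_map, src_map, zero)'
def combine (dst : List (String × Int)) (dstMap srcMap : PySem.Dict String Int) (zero : Bool) : List (String × Int) :=
  let extra := PySem.List.sorted2
    ((srcMap.items.filter (fun kv => !dstMap.contains kv.1)).map
      (fun kv => (kv.1, if zero then (0 : Int) else kv.2))) Prod.fst Prod.snd
  let a := PySem.List.sorted2 dst Prod.fst Prod.snd
  mergeLoop a extra

def fill_lists_alt (l1_tv : List (String × Int)) (l2_tv : List (String × Int)) (l1_df : List (String × Int)) (l2_df : List (String × Int)) : (List (String × Int)) × (List (String × Int)) × (List (String × Int)) × (List (String × Int)) :=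
  let m1_tv := firstMap l1_tv
  let m2_tv := firstMap l2_tv
  let m1_df := firstMap l1_df
  let m2_df := firstMap l2_df
  (combine l1_tv m1_tv m2_tv true, combine l2_tv m2_tv m1_tv true,
   combine l1_df m1_df m2_df false, combine l2_df m2_df m1_df false)

-- ===== PRECONDITION & SPEC =====
def Spec_fill_lists (l1_tv : List (String × Int)) (l2_tv : List (String × Int)) (l1_df : List (String × Int)) (l2_df : List (String × Int)) (out : (List (String × Int)) × (List (String × Int)) × (List (String × Int)) × (List (String × Int))) : Prop := out = fill_lists_alt l1_tv l2_tv l1_df l2_df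
instance (l1_tv : List (String × Int)) (l2_tv : List (String × Int)) (l1_df : List (String × Int)) (l2_df : List (String × Int)) (out : (List (String × Int)) × (List (String × Int)) × (List (String × Int)) × (List (String × Int))) : Decidable (Spec_fill_lists l1_tv l2_tv l1_df l2_df out) := by unfold Spec_fill_lists; infer_instance

-- ===== CLAIM (what is proved, stated in full; the proofs are below) =====
def Claim_equal_fill_lists : Prop := ∀ (l1_tv : List (String × Int)) (l2_tv : List (String × Int)) (l1_df : List (String × Int)) (l2_df : List (String × Int)), Dom_fill_lists l1_tv l2_tv l1_df l2_df → Spec_fill_lists l1_tv l2_tv l1_df l2_df (fill_lists l1_tv l2_tv l1_df l2_df)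

-- ===== LEMMAS AND PROOFS =====

-- proof-side description of what A's fill loops append: first occurrences of missing keys
def additions (zero : Bool) : List (String × Int) → PySem.Set String → List (String × Int) → List (String × Int)
  | [], _, out => out
  | (k, v) :: rest, seen, out =>
    if PySem.Set.contains seen k then additions zero rest seen out
    else additions zero rest (PySem.Set.add seen k) (out ++ [if zero then (k, 0) else (k, v)])

def keysOf (l : List (String × Int)) : PySem.Set String :=
  PySem.Set.ofList (l.map Prod.fst)

lemma pyFound_iff (k : String) (l : List (String × Int)) :
    pyFound k l = true ↔ k ∈ l.map Prod.fst := by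
  unfold pyFound
  rw [PySem.List.foldl_if_true_eq]
  simp

lemma additions_out (zero : Bool) (src : List (String × Int)) :
    ∀ (seen : PySem.Set String) (out : List (String × Int)),
      additions zero src seen out = out ++ additions zero src seen [] := by
  induction src with
  | nil => intro seen out; simp [additions]
  | cons p rest ih =>
    intro seen out
    obtain ⟨k, v⟩ := p
    by_cases h : PySem.Set.contains seen k
    · simp only [additions, h, if_true]
      exact ih seen out
    · simp only [additions, h, if_false, Bool.false_eq_true]
      rw [ih, ih (PySem.Set.add seen k) ([] ++ [if zero then (k, 0) else (k, v)])]
      simp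

lemma additions_keys (zero : Bool) (src : List (String × Int)) :
    ∀ (seen : PySem.Set String) (out p : _), p ∈ additions zero src seen out →
      p ∈ out ∨ p.1 ∈ src.map Prod.fst := by
  induction src with
  | nil => intro seen out p h; simp [additions] at h; exact Or.inl h
  | cons q rest ih =>
    intro seen out p h
    obtain ⟨k, v⟩ := q
    by_cases hc : PySem.Set.contains seen k
    · simp only [additions, hc, if_true] at h
      rcases ih seen out p h with h' | h'
      · exact Or.inl h'
      · right; simp at h' ⊢; tauto
    · simp only [additions, hc, if_false, Bool.false_eq_true] at h
      rcases ih _ _ p h with h' | h'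
      · rcases List.mem_append.mp h' with h'' | h''
        · exact Or.inl h''
        · right
          have : p.1 = k := by
            rcases zero with _ | _ <;> simp at h'' <;> simp [h'']
          simp [this]
      · right; simp at h' ⊢; tauto

lemma fillLoop_skip (g : (String × Int) → (String × Int)) (src : List (String × Int)) :
    ∀ acc, (∀ p ∈ src, p.1 ∈ acc.map Prod.fst) → fillLoop g src acc = acc := by
  induction src with
  | nil => intro acc _; simp [fillLoop]
  | cons p rest ih =>
    intro acc h
    have hf : pyFound p.1 acc = true := (pyFound_iff _ _).mpr (h p (by simp))
    simp only [fillLoop, hf, if_true]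
    exact ih acc (fun q hq => h q (by simp [hq]))

lemma fillLoop_append (g : (String × Int) → (String × Int)) (xs ys : List (String × Int)) :
    ∀ acc, fillLoop g (xs ++ ys) acc = fillLoop g ys (fillLoop g xs acc) := by
  induction xs with
  | nil => intro acc; simp [fillLoop]
  | cons p rest ih => intro acc; simp [fillLoop, ih]

lemma fillLoop_eq_additions (zero : Bool) (g : (String × Int) → (String × Int))
    (hg : ∀ p : String × Int, g p = if zero then (p.1, 0) else p) (src : List (String × Int)) :
    ∀ (seen : PySem.Set String) (acc : List (String × Int)),
      (∀ k, k ∈ seen ↔ k ∈ acc.map Prod.fst) →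
      fillLoop g src acc = acc ++ additions zero src seen [] := by
  induction src with
  | nil => intro seen acc _; simp [fillLoop, additions]
  | cons p rest ih =>
    intro seen acc hs
    obtain ⟨k, v⟩ := p
    by_cases hc : PySem.Set.contains seen k
    · have hk : k ∈ acc.map Prod.fst := (hs k).mp (by simpa using hc)
      have hf : pyFound k acc = true := (pyFound_iff _ _).mpr hk
      simp only [fillLoop, additions, hc, hf, if_true]
      exact ih seen acc hs
    · have hk : k ∉ acc.map Prod.fst := fun h => hc (by simpa using (hs k).mpr h)
      have hf : ¬ pyFound k acc = true := fun h => hk ((pyFound_iff _ _).mp h)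
      simp only [fillLoop, additions, hc, hf, if_false, Bool.false_eq_true]
      have hgp : g (k, v) = if zero then (k, 0) else (k, v) := hg (k, v)
      rw [ih (PySem.Set.add seen k) (acc ++ [g (k, v)]) ?_]
      · conv_rhs => rw [additions_out]
        simp [hgp]
      · intro k'
        rw [PySem.Set.mem_add, hs k']
        rcases zero with _ | _ <;> simp [hgp]

lemma keysOf_spec (l : List (String × Int)) : ∀ k, k ∈ keysOf l ↔ k ∈ l.map Prod.fst := by
  intro k; simp [keysOf, PySem.Set.mem_ofList]

lemma fill_pair_eq (zero : Bool) (g : (String × Int) → (String × Int))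
    (hg : ∀ p : String × Int, g p = if zero then (p.1, 0) else p)
    (l1 l2 : List (String × Int)) :
    fillLoop g l1 l2 = l2 ++ additions zero l1 (keysOf l2) [] ∧
    fillLoop g (fillLoop g l1 l2) l1 = l1 ++ additions zero l2 (keysOf l1) [] := by
  have h1 : fillLoop g l1 l2 = l2 ++ additions zero l1 (keysOf l2) [] :=
    fillLoop_eq_additions zero g hg l1 (keysOf l2) l2 (keysOf_spec l2)
  refine ⟨h1, ?_⟩
  rw [h1, fillLoop_append]
  have h2 : fillLoop g l2 l1 = l1 ++ additions zero l2 (keysOf l1) [] :=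
    fillLoop_eq_additions zero g hg l2 (keysOf l1) l1 (keysOf_spec l1)
  rw [h2]
  apply fillLoop_skip
  intro p hp
  rcases additions_keys zero l1 (keysOf l2) [] p hp with h | h
  · simp at h
  · simp only [List.map_append, List.mem_append]
    left
    exact h

-- ===== B-side lemmas =====

lemma contains_firstMap_go (l : List (String × Int)) :
    ∀ (d : PySem.Dict String Int) (k : String),
      (l.foldl (fun m kv => PySem.Dict.setdefault m kv.1 kv.2) d).contains k
        = (d.contains k || decide (k ∈ l.map Prod.fst)) := by
  induction l with
  | nil => intro d k; simp
  | cons p rest ih =>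
    intro d k
    obtain ⟨k0, v0⟩ := p
    rw [List.foldl_cons]
    by_cases hc : d.contains k0
    · have hid : PySem.Dict.setdefault d k0 v0 = d := by
        simp [PySem.Dict.setdefault, hc]
      rw [hid, ih]
      by_cases hk : k = k0
      · subst hk; simp [hc]
      · by_cases hm : k ∈ List.map Prod.fst rest <;> simp [hm, hk]
    · have hc' : d.contains k0 = false := by simpa using hc
      have hid : PySem.Dict.setdefault d k0 v0 = d.insert k0 v0 := by
        apply PySem.Dict.ext
        simp [PySem.Dict.setdefault, hc',
          PySem.Dict.items_insert_of_not_contains d v0 hc']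
      rw [hid, ih, PySem.Dict.contains_insert]
      by_cases hk : k = k0
      · subst hk; simp [hc']
      · by_cases hm : k ∈ List.map Prod.fst rest <;> cases d.contains k <;> simp [hm, hk]

lemma contains_firstMap (l : List (String × Int)) (k : String) :
    (firstMap l).contains k = PySem.Set.contains (keysOf l) k := by
  unfold firstMap
  rw [contains_firstMap_go]
  simp [keysOf, PySem.Set.mem_ofList]

lemma filtered_firstMap_go (zero : Bool) (S : PySem.Set String) (src : List (String × Int)) :
    ∀ (d : PySem.Dict String Int) (seen : PySem.Set String),
      (∀ k, PySem.Set.contains seen k = (PySem.Set.contains S k || d.contains k)) →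
      ((src.foldl (fun m kv => PySem.Dict.setdefault m kv.1 kv.2) d).items.filter
          (fun kv => !PySem.Set.contains S kv.1)).map (fun kv => (kv.1, if zero then (0 : Int) else kv.2))
        = ((d.items.filter (fun kv => !PySem.Set.contains S kv.1)).map
            (fun kv => (kv.1, if zero then (0 : Int) else kv.2))) ++ additions zero src seen [] := by
  induction src with
  | nil => intro d seen _; simp [additions]
  | cons p rest ih =>
    intro d seen hinv
    obtain ⟨k, v⟩ := p
    rw [List.foldl_cons]
    by_cases hc : PySem.Set.contains seen k
    · simp only [additions, hc, if_true]
      by_cases hd : d.contains k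
      · have hid : PySem.Dict.setdefault d k v = d := by
          simp [PySem.Dict.setdefault, hd]
        rw [hid]; exact ih d seen hinv
      · -- k ∉ d, so S contains k: the new dict entry is filtered out
        have hd' : d.contains k = false := by simpa using hd
        have hS : PySem.Set.contains S k = true := by
          have h := hinv k; rw [hc, hd'] at h; simpa using h.symm
        have hid : PySem.Dict.setdefault d k v = d.insert k v := by
          apply PySem.Dict.ext
          simp [PySem.Dict.setdefault, hd',
            PySem.Dict.items_insert_of_not_contains d v hd']
        have hSm : k ∈ S := by
          have := PySem.Set.contains_eq_decide S k; rw [hS] at this; simpa using this.symm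
        rw [hid, ih (d.insert k v) seen ?_]
        · congr 2
          rw [PySem.Dict.items_insert_of_not_contains d v hd']
          rw [List.filter_append]
          simp [hSm]
        · intro k'
          rw [hinv k', PySem.Dict.contains_insert d k k' v]
          by_cases hk : k' = k
          · subst hk; rw [hS]; rfl
          · cases d.contains k' <;> simp [hk]
    · -- new key, not in S, not in d: appended and kept by the filter
      have hc' : PySem.Set.contains seen k = false := by simpa using hc
      have hS : PySem.Set.contains S k = false := by
        have h := hinv k; rw [hc'] at h
        cases h1 : PySem.Set.contains S k
        · rfl
        · rw [h1] at h; simp at h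
      have hd' : d.contains k = false := by
        have h := hinv k; rw [hc', hS] at h
        simpa using h.symm
      have hid : PySem.Dict.setdefault d k v = d.insert k v := by
        apply PySem.Dict.ext
        simp [PySem.Dict.setdefault, hd',
          PySem.Dict.items_insert_of_not_contains d v hd']
      simp only [additions, hc, if_false, Bool.false_eq_true]
      rw [hid, ih (d.insert k v) (PySem.Set.add seen k) ?_]
      · rw [PySem.Dict.items_insert_of_not_contains d v hd']
        rw [additions_out zero rest (PySem.Set.add seen k)]
        rw [List.filter_append, List.map_append, List.append_assoc]
        congr 1
        simp only [List.filter_cons, List.filter_nil, hS, Bool.not_false, if_true]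
        rcases zero with _ | _ <;>
          · conv_rhs => rw [additions_out]
            simp
      · intro k'
        have hmem : k' ∈ PySem.Set.add seen k ↔ k' ∈ seen ∨ k' = k := PySem.Set.mem_add ..
        rw [PySem.Dict.contains_insert d k k' v]
        by_cases hk : k' = k
        · subst hk
          simp [hmem]
        · have hadd : PySem.Set.contains (PySem.Set.add seen k) k' = PySem.Set.contains seen k' := by
            simp [hmem, hk]
          rw [hadd, hinv k']
          cases d.contains k' <;> simp [hk]

lemma extras_eq (zero : Bool) (dst src : List (String × Int)) :
    ((firstMap src).items.filter (fun kv => !(firstMap dst).contains kv.1)).map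
        (fun kv => (kv.1, if zero then (0 : Int) else kv.2))
      = additions zero src (keysOf dst) [] := by
  have hfun : (fun kv : String × Int => !(firstMap dst).contains kv.1)
      = (fun kv : String × Int => !PySem.Set.contains (keysOf dst) kv.1) := by
    funext kv; rw [contains_firstMap]
  rw [hfun]
  unfold firstMap
  rw [filtered_firstMap_go zero (keysOf dst) src PySem.Dict.empty (keysOf dst)
    (fun k => by rw [PySem.Dict.contains_empty, Bool.or_false])]
  simp [PySem.Dict.empty]

-- lexicographic order on the pairs (Python's tuple order)
lemma pairLe_iff (p q : String × Int) : pairLe p q = true ↔ toLex p ≤ toLex q := by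
  simp only [pairLe, Bool.or_eq_true, Bool.and_eq_true, decide_eq_true_eq, beq_iff_eq,
    Prod.Lex.le_iff, ofLex_toLex]

lemma pairLe_false (p q : String × Int) (h : pairLe p q = false) : toLex q ≤ toLex p := by
  have : ¬ toLex p ≤ toLex q := fun hle => by simp [(pairLe_iff p q).mpr hle] at h
  exact le_of_not_ge this

lemma mergeLoop_perm : ∀ (xs ys : List (String × Int)), (mergeLoop xs ys).Perm (xs ++ ys) := by
  intro xs ys
  fun_induction mergeLoop xs ys with
  | case1 ys => simp
  | case2 x xs => simp
  | case3 x xs y ys h ih => simpa using ih.cons x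
  | case4 x xs y ys h ih => exact (ih.cons y).trans List.perm_middle.symm

lemma mergeLoop_pairwise : ∀ (xs ys : List (String × Int)),
    xs.Pairwise (fun a b => toLex a ≤ toLex b) → ys.Pairwise (fun a b => toLex a ≤ toLex b) →
    (mergeLoop xs ys).Pairwise (fun a b => toLex a ≤ toLex b) := by
  intro xs ys
  fun_induction mergeLoop xs ys with
  | case1 ys => intro _ hy; exact hy
  | case2 x xs => intro hx _; exact hx
  | case3 x xs y ys h ih =>
    intro hx hy
    obtain ⟨hx1, hx2⟩ := List.pairwise_cons.mp hx
    refine List.pairwise_cons.mpr ⟨?_, ih hx2 hy⟩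
    intro z hz
    have hz' := (mergeLoop_perm xs (y :: ys)).mem_iff.mp hz
    rcases List.mem_append.mp hz' with hz1 | hz1
    · exact hx1 z hz1
    · rcases List.mem_cons.mp hz1 with rfl | hz2
      · exact (pairLe_iff x z).mp h
      · exact le_trans ((pairLe_iff x y).mp h) ((List.pairwise_cons.mp hy).1 z hz2)
  | case4 x xs y ys h ih =>
    intro hx hy
    obtain ⟨hy1, hy2⟩ := List.pairwise_cons.mp hy
    refine List.pairwise_cons.mpr ⟨?_, ih hx hy2⟩
    intro z hz
    have hz' := (mergeLoop_perm (x :: xs) ys).mem_iff.mp hz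
    rcases List.mem_append.mp hz' with hz1 | hz1
    · rcases List.mem_cons.mp hz1 with rfl | hz2
      · exact pairLe_false _ y (by simpa using h)
      · exact le_trans (pairLe_false x y (by simpa using h)) ((List.pairwise_cons.mp hx).1 z hz2)
    · exact hy1 z hz1

lemma sorted2_foldl_pairwise (xs : List (String × Int)) :
    ∀ acc : List (String × Int), acc.Pairwise (fun a b => toLex a ≤ toLex b) →
    (List.foldl (fun acc x => PySem.List.insertBy
        (fun a b => decide ((fun p : String × Int => toLex p) a < (fun p : String × Int => toLex p) b)) x acc) acc xs).Pairwise
      (fun a b => toLex a ≤ toLex b) := by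
  induction xs with
  | nil => intro acc h; simpa using h
  | cons x rest ih =>
    intro acc h
    simp only [List.foldl_cons]
    exact ih _ (PySem.List.insertBy_pairwise_le (fun p : String × Int => toLex p) x acc h)

lemma sorted2_lt_eq :
    (fun a b : String × Int => (decide (a.1 < b.1) || (!decide (b.1 < a.1) && decide (a.2 < b.2))))
      = fun a b : String × Int => decide ((fun p : String × Int => toLex p) a < (fun p : String × Int => toLex p) b) := by
  funext a b
  apply Bool.eq_iff_iff.mpr
  simp only [Bool.or_eq_true, Bool.and_eq_true, Bool.not_eq_true', decide_eq_true_eq,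
    decide_eq_false_iff_not, Prod.Lex.lt_iff, ofLex_toLex]
  constructor
  · rintro (h | ⟨h1, h2⟩)
    · exact Or.inl h
    · by_cases h3 : a.1 < b.1
      · exact Or.inl h3
      · exact Or.inr ⟨le_antisymm (not_lt.mp h1) (not_lt.mp h3), h2⟩
  · rintro (h | ⟨h1, h2⟩)
    · exact Or.inl h
    · exact Or.inr ⟨by simp [h1], h2⟩

lemma sorted2_pairwise_lex (xs : List (String × Int)) :
    (PySem.List.sorted2 xs Prod.fst Prod.snd).Pairwise (fun a b => toLex a ≤ toLex b) := by
  have hdef : PySem.List.sorted2 xs Prod.fst Prod.snd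
      = List.foldl (fun acc x => PySem.List.insertBy
          (fun a b => decide ((fun p : String × Int => toLex p) a < (fun p : String × Int => toLex p) b)) x acc) [] xs := by
    rw [← sorted2_lt_eq]; rfl
  rw [hdef]
  exact sorted2_foldl_pairwise xs [] (by simp)

lemma sorted2_eq_of (xs ys : List (String × Int)) (hp : ys.Perm xs)
    (hs : ys.Pairwise (fun a b => toLex a ≤ toLex b)) :
    PySem.List.sorted2 xs Prod.fst Prod.snd = ys := by
  exact PySem.List.eq_of_perm_of_pairwise_le_of_injective (fun p : String × Int => toLex p)
    toLex.injective ((PySem.List.sorted2_perm xs Prod.fst Prod.snd false).trans hp.symm)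
    (sorted2_pairwise_lex xs) hs

lemma combine_eq (dst src : List (String × Int)) (zero : Bool) :
    combine dst (firstMap dst) (firstMap src) zero
      = PySem.List.sorted2 (dst ++ additions zero src (keysOf dst) []) Prod.fst Prod.snd := by
  unfold combine
  rw [extras_eq]
  refine (sorted2_eq_of _ _ ?_ ?_).symm
  · exact (mergeLoop_perm _ _).trans
      ((PySem.List.sorted2_perm dst Prod.fst Prod.snd false).append
        (PySem.List.sorted2_perm _ Prod.fst Prod.snd false))
  · exact mergeLoop_pairwise _ _ (sorted2_pairwise_lex dst) (sorted2_pairwise_lex _)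

-- ===== VERDICT (by name: the statement is the Claim_ definition above) =====
theorem fill_lists_spec : Claim_equal_fill_lists := by
  intro l1_tv l2_tv l1_df l2_df _
  unfold Spec_fill_lists
  obtain ⟨htv1, htv2⟩ := fill_pair_eq true (fun p => (p.1, 0)) (fun p => rfl) l1_tv l2_tv
  obtain ⟨hdf1, hdf2⟩ := fill_pair_eq false (fun p => p) (fun p => rfl) l1_df l2_df
  simp only [fill_lists, fill_lists_alt]
  rw [htv2, hdf2, htv1, hdf1, combine_eq, combine_eq, combine_eq, combine_eq]
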